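-- pv_equiv track=rewrite | github.com/sidharth3/sign-language-recognition | dataloader.py | sequential_sampling
-- ===== SOURCE A (Python) =====
-- def sequential_sampling(frame_start, frame_end, num_samples):
--     """Keep sequentially ${num_samples} frames from the whole video sequence by uniformly skipping frames."""
--     num_frames = frame_end - frame_start + 1
--
--     frames_to_sample = []
--     if num_frames > num_samples:
--         frames_skip = set()
--
--         num_skips = num_frames - num_samples
--         interval = num_frames // num_skips
--
--         for i in range(frame_start, frame_end + 1):
--             if i % interval == 0 and len(frames_skip) <= num_skips:
--                 frames_skip.add(i)
--
--         for i in range(frame_start, frame_end + 1):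
--             if i not in frames_skip:
--                 frames_to_sample.append(i)
--     else:
--         frames_to_sample = list(range(frame_start, frame_end + 1))
--
--     return frames_to_sample
-- ===== SOURCE B (Python) =====
-- def sequential_sampling(frame_start, frame_end, num_samples):
--     """Keep sequentially ${num_samples} frames by uniformly skipping frames (single fused pass)."""
--     num_frames = frame_end - frame_start + 1
--     if num_frames <= num_samples:
--         return list(range(frame_start, frame_end + 1))
--     num_skips = num_frames - num_samples
--     interval = num_frames // num_skips
--     out = []
--     skipped = 0
--     for i in range(frame_start, frame_end + 1):
--         if i % interval == 0 and skipped <= num_skips: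
--             skipped += 1
--         else:
--             out.append(i)
--     return out
-- ===== Notes on version B (the rewrite author's own statement) =====
-- stated objective: simpler
-- what changed: B fuses A's two passes (build a skip-set over the range, then filter the range against it) into one pass that decides each frame inline with an integer skip counter, eliminating the set entirely.
import Mathlib
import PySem

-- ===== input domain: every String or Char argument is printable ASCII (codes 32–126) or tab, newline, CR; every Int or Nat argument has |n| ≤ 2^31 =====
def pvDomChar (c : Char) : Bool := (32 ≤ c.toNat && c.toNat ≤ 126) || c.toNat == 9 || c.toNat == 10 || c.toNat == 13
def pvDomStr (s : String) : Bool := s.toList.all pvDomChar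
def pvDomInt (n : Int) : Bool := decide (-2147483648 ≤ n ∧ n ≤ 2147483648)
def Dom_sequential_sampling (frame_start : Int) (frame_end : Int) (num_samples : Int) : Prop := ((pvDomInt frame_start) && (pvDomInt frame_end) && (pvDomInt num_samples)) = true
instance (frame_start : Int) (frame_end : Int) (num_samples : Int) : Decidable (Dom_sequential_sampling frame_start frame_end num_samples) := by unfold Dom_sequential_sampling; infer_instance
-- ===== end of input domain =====

-- B fuses A's two passes (skip-set then filter) into one pass with an integer skip counter; objective: simpler (same O(n) cost, no set).

-- ===== PORT A =====
def sequential_sampling (frame_start : Int) (frame_end : Int) (num_samples : Int) : List Int :=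
  let num_frames := frame_end - frame_start + 1
  if num_frames > num_samples then
    let num_skips := num_frames - num_samples
    let interval := PySem.Int.floordiv num_frames num_skips
    let frames_skip : PySem.Set Int :=
      (PySem.List.pyRange frame_start (frame_end + 1) 1).foldl
        (fun s i =>
          if PySem.Int.mod i interval == 0 && decide ((s.length : Int) ≤ num_skips) then
            PySem.Set.add s i
          else s)
        PySem.Set.empty
    (PySem.List.pyRange frame_start (frame_end + 1) 1).foldl
      (fun acc i => if PySem.Set.contains frames_skip i then acc else acc ++ [i]) []
  else
    PySem.List.pyRange frame_start (frame_end + 1) 1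

-- ===== PORT B =====
-- single pass: skipped counter instead of a set; test-then-increment in iteration order
def seqAltGo (interval : Int) (num_skips : Int) : List Int → Int → List Int → List Int
  | [], _, acc => acc
  | i :: t, skipped, acc =>
      if PySem.Int.mod i interval == 0 && decide (skipped ≤ num_skips) then
        seqAltGo interval num_skips t (skipped + 1) acc
      else
        seqAltGo interval num_skips t skipped (acc ++ [i])

def sequential_sampling_alt (frame_start : Int) (frame_end : Int) (num_samples : Int) : List Int :=
  let num_frames := frame_end - frame_start + 1
  if num_frames ≤ num_samples then
    PySem.List.pyRange frame_start (frame_end + 1) 1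
  else
    let num_skips := num_frames - num_samples
    let interval := PySem.Int.floordiv num_frames num_skips
    seqAltGo interval num_skips (PySem.List.pyRange frame_start (frame_end + 1) 1) 0 []

-- ===== PRECONDITION & SPEC =====
-- Pre_ excludes exactly the inputs where the Python raises ZeroDivisionError (both A and B do):
-- a nonempty frame range together with a negative num_samples makes interval = num_frames // num_skips zero.
def Pre_sequential_sampling (frame_start : Int) (frame_end : Int) (num_samples : Int) : Prop :=
  0 ≤ num_samples ∨ frame_end < frame_start
instance (frame_start : Int) (frame_end : Int) (num_samples : Int) : Decidable (Pre_sequential_sampling frame_start frame_end num_samples) := by unfold Pre_sequential_sampling; infer_instance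

def pvWitness_sequential_sampling : Int × Int × Int := (0, 4, 3)

def Spec_sequential_sampling (frame_start : Int) (frame_end : Int) (num_samples : Int) (out : List Int) : Prop := out = sequential_sampling_alt frame_start frame_end num_samples
instance (frame_start : Int) (frame_end : Int) (num_samples : Int) (out : List Int) : Decidable (Spec_sequential_sampling frame_start frame_end num_samples out) := by unfold Spec_sequential_sampling; infer_instance

-- ===== CLAIM (what is proved, stated in full; the proofs are below) =====
def Claim_equal_sequential_sampling : Prop := ∀ (frame_start : Int) (frame_end : Int) (num_samples : Int), Dom_sequential_sampling frame_start frame_end num_samples → Pre_sequential_sampling frame_start frame_end num_samples → Spec_sequential_sampling frame_start frame_end num_samples (sequential_sampling frame_start frame_end num_samples)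

-- ===== LEMMAS AND PROOFS =====

-- the set built by A's first pass only grows
lemma mem_pass1_of_mem (interval num_skips : Int) :
    ∀ (t : List Int) (S : PySem.Set Int) (x : Int), x ∈ S →
      x ∈ t.foldl
        (fun s i =>
          if PySem.Int.mod i interval == 0 && decide ((s.length : Int) ≤ num_skips) then
            PySem.Set.add s i
          else s) S := by
  intro t
  induction t with
  | nil => intro S x hx; simpa using hx
  | cons i t ih =>
      intro S x hx
      simp only [List.foldl_cons]
      apply ih
      split
      · exact (PySem.Set.mem_add _ _ _).mpr (Or.inl hx)
      · exact hx

-- everything in A's skip set came from S or from the traversed list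
lemma mem_pass1_imp (interval num_skips : Int) :
    ∀ (t : List Int) (S : PySem.Set Int) (x : Int),
      x ∈ t.foldl
        (fun s i =>
          if PySem.Int.mod i interval == 0 && decide ((s.length : Int) ≤ num_skips) then
            PySem.Set.add s i
          else s) S → x ∈ S ∨ x ∈ t := by
  intro t
  induction t with
  | nil => intro S x hx; exact Or.inl (by simpa using hx)
  | cons i t ih =>
      intro S x hx
      simp only [List.foldl_cons] at hx
      rcases ih _ x hx with h | h
      · revert h; split
        · intro h
          rcases (PySem.Set.mem_add _ _ _).mp h with h' | h'
          · exact Or.inl h'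
          · exact Or.inr (by simp [h'])
        · intro h; exact Or.inl h
      · exact Or.inr (List.mem_cons_of_mem _ h)

-- main invariant: filtering l against the full skip set equals the fused single pass,
-- provided the current set S is disjoint from the remaining list l and skipped = |S|
lemma seq_main (interval num_skips : Int) :
    ∀ (l : List Int) (S : PySem.Set Int) (acc : List Int),
      l.Nodup → (∀ x ∈ S, x ∉ l) →
      l.foldl
        (fun a i =>
          if PySem.Set.contains
              (l.foldl
                (fun s i =>
                  if PySem.Int.mod i interval == 0 && decide ((s.length : Int) ≤ num_skips) then
                    PySem.Set.add s i
                  else s) S) i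
          then a else a ++ [i]) acc
        = seqAltGo interval num_skips l ((S.length : Int)) acc := by
  intro l
  induction l with
  | nil => intro S acc _ _; simp [seqAltGo]
  | cons i t ih =>
      intro S acc hnd hdisj
      have hit : i ∉ t := (List.nodup_cons.mp hnd).1
      have hiS : i ∉ S := fun h => hdisj i h (List.mem_cons_self ..)
      simp only [List.foldl_cons]
      by_cases hc : (PySem.Int.mod i interval == 0 && decide ((S.length : Int) ≤ num_skips)) = true
      · -- i is skipped: it was added to the set, so the filter drops it
        have hmem : i ∈ t.foldl
            (fun s i =>
              if PySem.Int.mod i interval == 0 && decide ((s.length : Int) ≤ num_skips) then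
                PySem.Set.add s i
              else s) (PySem.Set.add S i) :=
          mem_pass1_of_mem _ _ _ _ _ ((PySem.Set.mem_add _ _ _).mpr (Or.inr rfl))
        have hcont : (t.foldl
            (fun s i =>
              if PySem.Int.mod i interval == 0 && decide ((s.length : Int) ≤ num_skips) then
                PySem.Set.add s i
              else s) (PySem.Set.add S i)).contains i = true :=
          (PySem.Set.contains_iff _ _).mpr hmem
        have hlen : (PySem.Set.add S i).length = S.length + 1 := by
          rw [PySem.Set.add_of_not_mem hiS]; simp
        simp only [seqAltGo, hc, if_true, hcont]
        have key := ih (PySem.Set.add S i) acc (List.nodup_cons.mp hnd).2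
          (by
            intro x hx hxt
            rcases (PySem.Set.mem_add _ _ _).mp hx with h' | h'
            · exact hdisj x h' (List.mem_cons_of_mem _ hxt)
            · exact hit (h' ▸ hxt))
        rw [hlen] at key
        push_cast at key ⊢
        exact key
      · -- i is kept: it never entered the set, so the filter keeps it
        have hnmem : i ∉ t.foldl
            (fun s i =>
              if PySem.Int.mod i interval == 0 && decide ((s.length : Int) ≤ num_skips) then
                PySem.Set.add s i
              else s) S := by
          intro h
          rcases mem_pass1_imp _ _ _ _ _ h with h' | h'
          · exact hiS h'
          · exact hit h'
        have hcont : (t.foldl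
            (fun s i =>
              if PySem.Int.mod i interval == 0 && decide ((s.length : Int) ≤ num_skips) then
                PySem.Set.add s i
              else s) S).contains i = false := by
          rw [← Bool.not_eq_true, PySem.Set.contains_iff]; exact hnmem
        simp only [Bool.not_eq_true] at hc
        simp only [seqAltGo, hc, Bool.false_eq_true, if_false, hcont]
        exact ih S (acc ++ [i]) (List.nodup_cons.mp hnd).2
          (fun x hx hxt => hdisj x hx (List.mem_cons_of_mem _ hxt))

-- ===== VERDICT (by name: the statement is the Claim_ definition above) =====
theorem sequential_sampling_spec : Claim_equal_sequential_sampling := by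
  intro fs fe ns _ _
  unfold Spec_sequential_sampling sequential_sampling sequential_sampling_alt
  by_cases h : fe - fs + 1 > ns
  · rw [if_pos h, if_neg (by omega)]
    have := seq_main (PySem.Int.floordiv (fe - fs + 1) (fe - fs + 1 - ns)) (fe - fs + 1 - ns)
      (PySem.List.pyRange fs (fe + 1) 1) PySem.Set.empty []
      (PySem.List.nodup_pyRange_one fs (fe + 1))
      (by intro x hx; simp [PySem.Set.empty] at hx)
    simpa using this
  · rw [if_neg h, if_pos (by omega)]
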